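-- pv_equiv track=rewrite | github.com/val-is/advent-of-code | 2021/day23.py | get_possible_waiting_tiles
-- ===== SOURCE A (Python) =====
-- WAITING_TILES = [(i,1) for i in [1,2,4,6,8,10,11]]
--
-- def get_possible_waiting_tiles(tile, waiting_pods):
--     # tile, dist_horiz
--     possible_l = [i for i in WAITING_TILES if i[0] < tile[0]]
--     filled_l = [i for i in waiting_pods if i[0] < tile[0] and waiting_pods[i] != " "]
--     possible_l = sorted(possible_l, key=lambda x: x[0])[::-1]
--     ls = []
--     for i in possible_l:
--         if i not in filled_l:
--             ls.append(i)
--         else: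
--             break
--
--     possible_r = [i for i in WAITING_TILES if i[0] > tile[0]]
--     filled_r = [i for i in waiting_pods if i[0] > tile[0] and waiting_pods[i] != " "]
--     possible_r = sorted(possible_r, key=lambda x: x[0])
--     rs = []
--     for i in possible_r:
--         if i not in filled_r:
--             rs.append(i)
--         else:
--             break
--
--     possible = ls + rs
--     r = []
--     for i in possible:
--         r.append((i, abs(tile[0] - i[0])))
--
--     return r
-- ===== SOURCE B (Python) =====
-- WAITING_TILES = [(i, 1) for i in [1, 2, 4, 6, 8, 10, 11]]
--
-- def get_possible_waiting_tiles(tile, waiting_pods):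
--     # Per-candidate reachability test against an occupancy set, instead of
--     # sorted sweeps with break: a tile is reachable iff no occupied waiting
--     # x lies in the closed-open span between it and the source column.
--     tx = tile[0]
--     occ = {t[0] for t in WAITING_TILES if waiting_pods.get(t, " ") != " "}
--     left = [t for t in reversed(WAITING_TILES)
--             if t[0] < tx and not any(t[0] <= b < tx for b in occ)]
--     right = [t for t in WAITING_TILES
--              if tx < t[0] and not any(tx < b <= t[0] for b in occ)]
--     return [(t, abs(tx - t[0])) for t in left + right]
-- ===== Notes on version B (the rewrite author's own statement) =====
-- stated objective: alternative
-- what changed: Replaces the two sort-then-sweep-with-break loops over side-specific filled lists by one occupancy set of x-coordinates and an independent empty-span reachability test per candidate tile.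
import Mathlib
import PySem

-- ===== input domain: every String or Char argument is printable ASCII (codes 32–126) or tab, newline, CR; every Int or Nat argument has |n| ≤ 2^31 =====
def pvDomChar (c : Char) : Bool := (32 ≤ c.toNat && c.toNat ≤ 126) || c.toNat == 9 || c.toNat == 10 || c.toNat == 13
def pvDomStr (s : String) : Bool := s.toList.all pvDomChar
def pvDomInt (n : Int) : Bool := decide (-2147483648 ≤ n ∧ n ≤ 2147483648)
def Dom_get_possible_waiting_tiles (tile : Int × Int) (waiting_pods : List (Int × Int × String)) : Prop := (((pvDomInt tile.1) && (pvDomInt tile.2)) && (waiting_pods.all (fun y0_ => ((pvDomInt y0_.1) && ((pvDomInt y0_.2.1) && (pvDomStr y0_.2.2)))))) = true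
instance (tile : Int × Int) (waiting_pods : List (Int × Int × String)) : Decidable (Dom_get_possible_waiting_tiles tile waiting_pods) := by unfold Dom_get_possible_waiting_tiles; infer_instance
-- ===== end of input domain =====

-- B replaces A's sort-then-sweep-with-break per side by an occupancy set and an
-- independent empty-span test per candidate tile (alternative decomposition, same cost).

-- ===== PORT A =====
-- WAITING_TILES = [(i,1) for i in [1,2,4,6,8,10,11]]
def pvWAITING : List (Int × Int) := ([1, 2, 4, 6, 8, 10, 11] : List Int).map (fun i => (i, 1))

-- first-match association-list lookup with default " ": exact for dict.get(k, " "),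
-- and for dict[k] whenever k is a key of the dict (the only way A uses it).
def pvDictGetD (wp : List (Int × Int × String)) (k : Int × Int) : String :=
  match wp with
  | [] => " "
  | (x, y, v) :: rest => if x = k.1 ∧ y = k.2 then v else pvDictGetD rest k

-- A's 'for i in possible: append until i in filled, then break' loop
def pvSweep (filled : List (Int × Int)) : List (Int × Int) → List (Int × Int)
  | [] => []
  | i :: rest => if filled.contains i then [] else i :: pvSweep filled rest

def get_possible_waiting_tiles (tile : Int × Int) (waiting_pods : List (Int × Int × String)) : List ((Int × Int) × Int) :=
  let possible_l := pvWAITING.filter (fun i => decide (i.1 < tile.1))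
  let filled_l := (waiting_pods.filter (fun e => decide (e.1 < tile.1) && decide (pvDictGetD waiting_pods (e.1, e.2.1) ≠ " "))).map (fun e => (e.1, e.2.1))
  -- sorted(possible_l, key=lambda x: x[0])[::-1]   ([::-1] is List.reverse)
  let possible_l' := (PySem.List.sorted possible_l (fun x => x.1) false).reverse
  let ls := pvSweep filled_l possible_l'
  let possible_r := pvWAITING.filter (fun i => decide (tile.1 < i.1))
  let filled_r := (waiting_pods.filter (fun e => decide (tile.1 < e.1) && decide (pvDictGetD waiting_pods (e.1, e.2.1) ≠ " "))).map (fun e => (e.1, e.2.1))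
  let possible_r' := PySem.List.sorted possible_r (fun x => x.1) false
  let rs := pvSweep filled_r possible_r'
  (ls ++ rs).map (fun i => (i, |tile.1 - i.1|))

-- ===== PORT B =====
def get_possible_waiting_tiles_alt (tile : Int × Int) (waiting_pods : List (Int × Int × String)) : List ((Int × Int) × Int) :=
  let tx := tile.1
  let occ : PySem.Set Int := PySem.Set.ofList ((pvWAITING.filter (fun t => decide (pvDictGetD waiting_pods t ≠ " "))).map (fun t => t.1))
  let left := pvWAITING.reverse.filter (fun t => decide (t.1 < tx) && !(occ.any (fun b => decide (t.1 ≤ b) && decide (b < tx))))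
  let right := pvWAITING.filter (fun t => decide (tx < t.1) && !(occ.any (fun b => decide (tx < b) && decide (b ≤ t.1))))
  (left ++ right).map (fun t => (t, |tx - t.1|))

-- ===== PRECONDITION & SPEC =====
def Spec_get_possible_waiting_tiles (tile : Int × Int) (waiting_pods : List (Int × Int × String)) (out : List ((Int × Int) × Int)) : Prop := out = get_possible_waiting_tiles_alt tile waiting_pods
instance (tile : Int × Int) (waiting_pods : List (Int × Int × String)) (out : List ((Int × Int) × Int)) : Decidable (Spec_get_possible_waiting_tiles tile waiting_pods out) := by unfold Spec_get_possible_waiting_tiles; infer_instance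

-- ===== CLAIM (what is proved, stated in full; the proofs are below) =====
def Claim_equal_get_possible_waiting_tiles : Prop := ∀ (tile : Int × Int) (waiting_pods : List (Int × Int × String)), Dom_get_possible_waiting_tiles tile waiting_pods → Spec_get_possible_waiting_tiles tile waiting_pods (get_possible_waiting_tiles tile waiting_pods)

-- ===== LEMMAS AND PROOFS =====

-- a non-default lookup result means the key occurs in the list
theorem pvDictGetD_ne_mem (wp : List (Int × Int × String)) (k : Int × Int)
    (h : pvDictGetD wp k ≠ " ") : ∃ e ∈ wp, e.1 = k.1 ∧ e.2.1 = k.2 := by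
  induction wp with
  | nil => simp [pvDictGetD] at h
  | cons e rest ih =>
    obtain ⟨x, y, v⟩ := e
    by_cases hk : x = k.1 ∧ y = k.2
    · exact ⟨(x, y, v), by simp, hk.1, hk.2⟩
    · simp [pvDictGetD, hk] at h
      obtain ⟨e', he', h1, h2⟩ := ih h
      exact ⟨e', by simp [he'], h1, h2⟩

-- membership of (x, y) in A's "filled" key list, in terms of the lookup
theorem contains_filled (wp : List (Int × Int × String)) (tx x y : Int)
    (p : Int → Int → Bool) :
    ((wp.filter (fun e => p e.1 tx && decide (pvDictGetD wp (e.1, e.2.1) ≠ " "))).map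
        (fun e => (e.1, e.2.1))).contains (x, y)
      = (p x tx && decide (pvDictGetD wp (x, y) ≠ " ")) := by
  have key : ((x, y) ∈ (wp.filter (fun e => p e.1 tx && decide (pvDictGetD wp (e.1, e.2.1) ≠ " "))).map (fun e => (e.1, e.2.1)))
      ↔ (p x tx = true ∧ pvDictGetD wp (x, y) ≠ " ") := by
    constructor
    · intro h
      simp only [List.mem_map, List.mem_filter] at h
      obtain ⟨e, ⟨_, hp⟩, hk⟩ := h
      have hx : e.1 = x := congrArg Prod.fst hk
      have hy : e.2.1 = y := congrArg Prod.snd hk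
      rw [hx, hy] at hp
      simpa using hp
    · rintro ⟨hp, hg⟩
      obtain ⟨e, he, h1, h2⟩ := pvDictGetD_ne_mem wp (x, y) hg
      exact List.mem_map.mpr ⟨e, List.mem_filter.mpr ⟨he, by simp [h1, h2, hp, hg]⟩, by simp [h1, h2]⟩
  simp only [List.contains_eq_mem, key]
  simp

theorem contains_filled_lt (wp : List (Int × Int × String)) (tx x y : Int) :
    ((wp.filter (fun e => decide (e.1 < tx) && decide (pvDictGetD wp (e.1, e.2.1) ≠ " "))).map
        (fun e => (e.1, e.2.1))).contains (x, y)
      = (decide (x < tx) && !decide (pvDictGetD wp (x, y) = " ")) := by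
  simpa using contains_filled wp tx x y (fun a b => decide (a < b))

theorem contains_filled_gt (wp : List (Int × Int × String)) (tx x y : Int) :
    ((wp.filter (fun e => decide (tx < e.1) && decide (pvDictGetD wp (e.1, e.2.1) ≠ " "))).map
        (fun e => (e.1, e.2.1))).contains (x, y)
      = (decide (tx < x) && !decide (pvDictGetD wp (x, y) = " ")) := by
  simpa using contains_filled wp tx x y (fun a b => decide (b < a))

-- A's sweep with an abstract blocked-test, for factoring wp out
def pvSweepG (cond : Int × Int → Bool) : List (Int × Int) → List (Int × Int)
  | [] => []
  | i :: rest => if cond i then [] else i :: pvSweepG cond rest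

theorem pvSweep_eq_sweepG (filled : List (Int × Int)) (cond : Int × Int → Bool)
    (l : List (Int × Int)) (h : ∀ i ∈ l, filled.contains i = cond i) :
    pvSweep filled l = pvSweepG cond l := by
  induction l with
  | nil => rfl
  | cons i rest ih =>
    simp only [pvSweep, pvSweepG, h i (by simp)]
    rw [ih (fun j hj => h j (by simp [hj]))]

-- the 7 occupancy bits of the waiting row, as a function on x-coordinates
def pvBits (b1 b2 b4 b6 b8 b10 b11 : Bool) : Int → Bool :=
  fun x => if x = 1 then b1 else if x = 2 then b2 else if x = 4 then b4
    else if x = 6 then b6 else if x = 8 then b8 else if x = 10 then b10 else b11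

-- A's tile list with wp abstracted to its 7 occupancy bits
def pvTA (tx : Int) (b1 b2 b4 b6 b8 b10 b11 : Bool) : List (Int × Int) :=
  let g := pvBits b1 b2 b4 b6 b8 b10 b11
  let possible_l := pvWAITING.filter (fun i => decide (i.1 < tx))
  let ls := pvSweepG (fun i => decide (i.1 < tx) && g i.1) ((PySem.List.sorted possible_l (fun x => x.1) false).reverse)
  let possible_r := pvWAITING.filter (fun i => decide (tx < i.1))
  let rs := pvSweepG (fun i => decide (tx < i.1) && g i.1) (PySem.List.sorted possible_r (fun x => x.1) false)
  ls ++ rs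

-- B's tile list with wp abstracted to its 7 occupancy bits
def pvTB (tx : Int) (b1 b2 b4 b6 b8 b10 b11 : Bool) : List (Int × Int) :=
  let g := pvBits b1 b2 b4 b6 b8 b10 b11
  let occ := PySem.Set.ofList ((pvWAITING.filter (fun t => g t.1)).map (fun t => t.1))
  let left := pvWAITING.reverse.filter (fun t => decide (t.1 < tx) && !(occ.any (fun b => decide (t.1 ≤ b) && decide (b < tx))))
  let right := pvWAITING.filter (fun t => decide (tx < t.1) && !(occ.any (fun b => decide (tx < b) && decide (b ≤ t.1))))
  left ++ right

theorem pvA_eq (tx ty : Int) (wp : List (Int × Int × String)) :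
    get_possible_waiting_tiles (tx, ty) wp
      = (pvTA tx (!decide (pvDictGetD wp (1, 1) = " ")) (!decide (pvDictGetD wp (2, 1) = " "))
          (!decide (pvDictGetD wp (4, 1) = " ")) (!decide (pvDictGetD wp (6, 1) = " "))
          (!decide (pvDictGetD wp (8, 1) = " ")) (!decide (pvDictGetD wp (10, 1) = " "))
          (!decide (pvDictGetD wp (11, 1) = " "))).map (fun i => (i, |tx - i.1|)) := by
  simp only [get_possible_waiting_tiles, pvTA]
  have hl := pvSweep_eq_sweepG
    ((wp.filter (fun e => decide (e.1 < tx) && decide (pvDictGetD wp (e.1, e.2.1) ≠ " "))).map (fun e => (e.1, e.2.1)))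
    (fun i => decide (i.1 < tx) && pvBits (!decide (pvDictGetD wp (1, 1) = " ")) (!decide (pvDictGetD wp (2, 1) = " "))
          (!decide (pvDictGetD wp (4, 1) = " ")) (!decide (pvDictGetD wp (6, 1) = " "))
          (!decide (pvDictGetD wp (8, 1) = " ")) (!decide (pvDictGetD wp (10, 1) = " "))
          (!decide (pvDictGetD wp (11, 1) = " ")) i.1)
    ((PySem.List.sorted (pvWAITING.filter (fun i => decide (i.1 < tx))) (fun x => x.1) false).reverse)
    (by
      intro i hi
      have hw : i ∈ pvWAITING := by
        have := (PySem.List.mem_sorted _ _ _ _).mp (List.mem_reverse.mp hi)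
        exact (List.mem_filter.mp this).1
      fin_cases hw <;> (rw [contains_filled_lt]; simp [pvBits]))
  have hr := pvSweep_eq_sweepG
    ((wp.filter (fun e => decide (tx < e.1) && decide (pvDictGetD wp (e.1, e.2.1) ≠ " "))).map (fun e => (e.1, e.2.1)))
    (fun i => decide (tx < i.1) && pvBits (!decide (pvDictGetD wp (1, 1) = " ")) (!decide (pvDictGetD wp (2, 1) = " "))
          (!decide (pvDictGetD wp (4, 1) = " ")) (!decide (pvDictGetD wp (6, 1) = " "))
          (!decide (pvDictGetD wp (8, 1) = " ")) (!decide (pvDictGetD wp (10, 1) = " "))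
          (!decide (pvDictGetD wp (11, 1) = " ")) i.1)
    (PySem.List.sorted (pvWAITING.filter (fun i => decide (tx < i.1))) (fun x => x.1) false)
    (by
      intro i hi
      have hw : i ∈ pvWAITING := (List.mem_filter.mp ((PySem.List.mem_sorted _ _ _ _).mp hi)).1
      fin_cases hw <;> (rw [contains_filled_gt]; simp [pvBits]))
  rw [hl, hr]

theorem pvB_eq (tx ty : Int) (wp : List (Int × Int × String)) :
    get_possible_waiting_tiles_alt (tx, ty) wp
      = (pvTB tx (!decide (pvDictGetD wp (1, 1) = " ")) (!decide (pvDictGetD wp (2, 1) = " "))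
          (!decide (pvDictGetD wp (4, 1) = " ")) (!decide (pvDictGetD wp (6, 1) = " "))
          (!decide (pvDictGetD wp (8, 1) = " ")) (!decide (pvDictGetD wp (10, 1) = " "))
          (!decide (pvDictGetD wp (11, 1) = " "))).map (fun t => (t, |tx - t.1|)) := by
  simp only [get_possible_waiting_tiles_alt, pvTB]
  have hocc : pvWAITING.filter (fun t => decide (pvDictGetD wp t ≠ " "))
      = pvWAITING.filter (fun t => pvBits (!decide (pvDictGetD wp (1, 1) = " ")) (!decide (pvDictGetD wp (2, 1) = " "))
          (!decide (pvDictGetD wp (4, 1) = " ")) (!decide (pvDictGetD wp (6, 1) = " "))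
          (!decide (pvDictGetD wp (8, 1) = " ")) (!decide (pvDictGetD wp (10, 1) = " "))
          (!decide (pvDictGetD wp (11, 1) = " ")) t.1) := by
    apply List.filter_congr
    intro t ht
    fin_cases ht <;> simp [pvBits]
  rw [hocc]

theorem pvSweepG_congr (cond cond' : Int × Int → Bool) (l : List (Int × Int))
    (h : ∀ i ∈ l, cond i = cond' i) : pvSweepG cond l = pvSweepG cond' l := by
  induction l with
  | nil => rfl
  | cons i rest ih =>
    simp only [pvSweepG, h i (by simp)]
    rw [ih (fun j hj => h j (by simp [hj]))]

-- an x-coordinate in B's occupancy set is an x-coordinate of a waiting tile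
theorem mem_occ (g : Int → Bool) (b : Int)
    (hb : b ∈ PySem.Set.ofList ((pvWAITING.filter (fun t => g t.1)).map (fun t => t.1))) :
    b ∈ ([1, 2, 4, 6, 8, 10, 11] : List Int) := by
  have := (PySem.Set.mem_ofList _ _).mp hb
  simp only [List.mem_map] at this
  obtain ⟨t, ht, rfl⟩ := this
  have hw : t ∈ pvWAITING := (List.mem_filter.mp ht).1
  fin_cases hw <;> simp

theorem pvAnyCongrMem {α : Type} (l : List α) (p q : α → Bool)
    (h : ∀ a ∈ l, p a = q a) : l.any p = l.any q := by
  induction l with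
  | nil => rfl
  | cons a t ih =>
    simp only [List.any_cons, h a (by simp)]
    rw [ih (fun b hb => h b (by simp [hb]))]

-- tile lists depend on tx only through its comparisons with the waiting x-coordinates
theorem pvTA_congr (tx tx' : Int) (b1 b2 b4 b6 b8 b10 b11 : Bool)
    (hc : ∀ k ∈ ([1, 2, 4, 6, 8, 10, 11] : List Int), ((k < tx) ↔ (k < tx')) ∧ ((tx < k) ↔ (tx' < k))) :
    pvTA tx b1 b2 b4 b6 b8 b10 b11 = pvTA tx' b1 b2 b4 b6 b8 b10 b11 := by
  simp only [pvTA]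
  have hmem : ∀ i : Int × Int, i ∈ pvWAITING → i.1 ∈ ([1, 2, 4, 6, 8, 10, 11] : List Int) := by
    intro i hi; fin_cases hi <;> simp
  have hfl : pvWAITING.filter (fun i => decide (i.1 < tx)) = pvWAITING.filter (fun i => decide (i.1 < tx')) :=
    List.filter_congr (fun i hi => decide_eq_decide.mpr (hc i.1 (hmem i hi)).1)
  have hfr : pvWAITING.filter (fun i => decide (tx < i.1)) = pvWAITING.filter (fun i => decide (tx' < i.1)) :=
    List.filter_congr (fun i hi => decide_eq_decide.mpr (hc i.1 (hmem i hi)).2)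
  rw [hfl, hfr]
  rw [pvSweepG_congr (fun i => decide (i.1 < tx) && pvBits b1 b2 b4 b6 b8 b10 b11 i.1)
        (fun i => decide (i.1 < tx') && pvBits b1 b2 b4 b6 b8 b10 b11 i.1) _
        (by
          intro i hi
          have hw : i ∈ pvWAITING := by
            have := (PySem.List.mem_sorted _ _ _ _).mp (List.mem_reverse.mp hi)
            exact (List.mem_filter.mp this).1
          simp only [decide_eq_decide.mpr (hc i.1 (hmem i hw)).1]),
      pvSweepG_congr (fun i => decide (tx < i.1) && pvBits b1 b2 b4 b6 b8 b10 b11 i.1)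
        (fun i => decide (tx' < i.1) && pvBits b1 b2 b4 b6 b8 b10 b11 i.1) _
        (by
          intro i hi
          have hw : i ∈ pvWAITING := (List.mem_filter.mp ((PySem.List.mem_sorted _ _ _ _).mp hi)).1
          simp only [decide_eq_decide.mpr (hc i.1 (hmem i hw)).2])]

theorem pvTB_congr (tx tx' : Int) (b1 b2 b4 b6 b8 b10 b11 : Bool)
    (hc : ∀ k ∈ ([1, 2, 4, 6, 8, 10, 11] : List Int), ((k < tx) ↔ (k < tx')) ∧ ((tx < k) ↔ (tx' < k))) :
    pvTB tx b1 b2 b4 b6 b8 b10 b11 = pvTB tx' b1 b2 b4 b6 b8 b10 b11 := by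
  simp only [pvTB]
  have hmem : ∀ i : Int × Int, i ∈ pvWAITING → i.1 ∈ ([1, 2, 4, 6, 8, 10, 11] : List Int) := by
    intro i hi; fin_cases hi <;> simp
  have hL : pvWAITING.reverse.filter (fun t => decide (t.1 < tx) && !((PySem.Set.ofList ((pvWAITING.filter (fun t => pvBits b1 b2 b4 b6 b8 b10 b11 t.1)).map (fun t => t.1))).any (fun b => decide (t.1 ≤ b) && decide (b < tx))))
      = pvWAITING.reverse.filter (fun t => decide (t.1 < tx') && !((PySem.Set.ofList ((pvWAITING.filter (fun t => pvBits b1 b2 b4 b6 b8 b10 b11 t.1)).map (fun t => t.1))).any (fun b => decide (t.1 ≤ b) && decide (b < tx')))) := by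
    apply List.filter_congr
    intro t ht
    have h1 : decide (t.1 < tx) = decide (t.1 < tx') := decide_eq_decide.mpr (hc t.1 (hmem t (List.mem_reverse.mp ht))).1
    have h2 := pvAnyCongrMem (PySem.Set.ofList ((pvWAITING.filter (fun t => pvBits b1 b2 b4 b6 b8 b10 b11 t.1)).map (fun t => t.1)))
      (fun b => decide (t.1 ≤ b) && decide (b < tx)) (fun b => decide (t.1 ≤ b) && decide (b < tx'))
      (fun b hb => by simp only [decide_eq_decide.mpr (hc b (mem_occ _ b hb)).1])
    simp only [h1, h2]
  have hR : pvWAITING.filter (fun t => decide (tx < t.1) && !((PySem.Set.ofList ((pvWAITING.filter (fun t => pvBits b1 b2 b4 b6 b8 b10 b11 t.1)).map (fun t => t.1))).any (fun b => decide (tx < b) && decide (b ≤ t.1))))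
      = pvWAITING.filter (fun t => decide (tx' < t.1) && !((PySem.Set.ofList ((pvWAITING.filter (fun t => pvBits b1 b2 b4 b6 b8 b10 b11 t.1)).map (fun t => t.1))).any (fun b => decide (tx' < b) && decide (b ≤ t.1)))) := by
    apply List.filter_congr
    intro t ht
    have h1 : decide (tx < t.1) = decide (tx' < t.1) := decide_eq_decide.mpr (hc t.1 (hmem t ht)).2
    have h2 := pvAnyCongrMem (PySem.Set.ofList ((pvWAITING.filter (fun t => pvBits b1 b2 b4 b6 b8 b10 b11 t.1)).map (fun t => t.1)))
      (fun b => decide (tx < b) && decide (b ≤ t.1)) (fun b => decide (tx' < b) && decide (b ≤ t.1))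
      (fun b hb => by simp only [decide_eq_decide.mpr (hc b (mem_occ _ b hb)).2])
    simp only [h1, h2]
  rw [hL, hR]

theorem pvTAB0 : ∀ b1 b2 b4 b6 b8 b10 b11 : Bool,
    pvTA 0 b1 b2 b4 b6 b8 b10 b11 = pvTB 0 b1 b2 b4 b6 b8 b10 b11 := by decide

theorem pvTAB12 : ∀ b1 b2 b4 b6 b8 b10 b11 : Bool,
    pvTA 12 b1 b2 b4 b6 b8 b10 b11 = pvTB 12 b1 b2 b4 b6 b8 b10 b11 := by decide

theorem pvTAB (tx : Int) (b1 b2 b4 b6 b8 b10 b11 : Bool) :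
    pvTA tx b1 b2 b4 b6 b8 b10 b11 = pvTB tx b1 b2 b4 b6 b8 b10 b11 := by
  rcases (by omega : tx ≤ 0 ∨ tx = 1 ∨ tx = 2 ∨ tx = 3 ∨ tx = 4 ∨ tx = 5 ∨ tx = 6 ∨ tx = 7 ∨ tx = 8 ∨ tx = 9 ∨ tx = 10 ∨ tx = 11 ∨ 12 ≤ tx) with
    h|h|h|h|h|h|h|h|h|h|h|h|h
  · rw [pvTA_congr tx 0 _ _ _ _ _ _ _ (by intro k hk; fin_cases hk <;> constructor <;> omega),
        pvTB_congr tx 0 _ _ _ _ _ _ _ (by intro k hk; fin_cases hk <;> constructor <;> omega)]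
    exact pvTAB0 b1 b2 b4 b6 b8 b10 b11
  · subst h; revert b1 b2 b4 b6 b8 b10 b11; decide
  · subst h; revert b1 b2 b4 b6 b8 b10 b11; decide
  · subst h; revert b1 b2 b4 b6 b8 b10 b11; decide
  · subst h; revert b1 b2 b4 b6 b8 b10 b11; decide
  · subst h; revert b1 b2 b4 b6 b8 b10 b11; decide
  · subst h; revert b1 b2 b4 b6 b8 b10 b11; decide
  · subst h; revert b1 b2 b4 b6 b8 b10 b11; decide
  · subst h; revert b1 b2 b4 b6 b8 b10 b11; decide
  · subst h; revert b1 b2 b4 b6 b8 b10 b11; decide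
  · subst h; revert b1 b2 b4 b6 b8 b10 b11; decide
  · subst h; revert b1 b2 b4 b6 b8 b10 b11; decide
  · rw [pvTA_congr tx 12 _ _ _ _ _ _ _ (by intro k hk; fin_cases hk <;> constructor <;> omega),
        pvTB_congr tx 12 _ _ _ _ _ _ _ (by intro k hk; fin_cases hk <;> constructor <;> omega)]
    exact pvTAB12 b1 b2 b4 b6 b8 b10 b11

-- ===== VERDICT (by name: the statement is the Claim_ definition above) =====
theorem get_possible_waiting_tiles_spec : Claim_equal_get_possible_waiting_tiles := by
  intro tile wp _
  obtain ⟨tx, ty⟩ := tile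
  unfold Spec_get_possible_waiting_tiles
  rw [pvA_eq, pvB_eq, pvTAB]
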